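-- pv_equiv track=rewrite | github.com/Geremm/Projet_Final_Semestre1 | functions.py | traitement_reponse_starter
-- ===== SOURCE A (Python) =====
-- def min(str):
--     txt = ''
--     for char in str:
--         if ord(char) >= 65 and ord(char) <= 90:
--             txt += chr(ord(char) + 32)
--         else:
--             txt += char
--
--     return txt
--
-- def traitement_reponse_starter(answer):
--     answer = min(answer)
--     txt = ''
--     alphabet = [chr(char) for char in range(ord('a'), ord('z')+1)]
--     i = 0
--     while answer[i] not in alphabet:
--         i += 1
--     for j in range(i, len(answer)):
--         txt += answer[j]
--     return txt
-- ===== SOURCE B (Python) =====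
-- def traitement_reponse_starter(answer):
--     i = 0
--     while not ('a' <= answer[i] <= 'z' or 'A' <= answer[i] <= 'Z'):
--         i += 1
--     return ''.join(chr(ord(c) + 32) if 'A' <= c <= 'Z' else c for c in answer[i:])
-- ===== Notes on version B (the rewrite author's own statement) =====
-- stated objective: faster
-- what changed: B reverses the phase order: it scans the original string for the first ASCII letter (upper or lower), then ASCII-lowercases only that suffix in one join over a generator, instead of A's quadratic lowercase-whole-string concatenation pass followed by an index-skip loop and a char-by-char copy loop.
import Mathlib
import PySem

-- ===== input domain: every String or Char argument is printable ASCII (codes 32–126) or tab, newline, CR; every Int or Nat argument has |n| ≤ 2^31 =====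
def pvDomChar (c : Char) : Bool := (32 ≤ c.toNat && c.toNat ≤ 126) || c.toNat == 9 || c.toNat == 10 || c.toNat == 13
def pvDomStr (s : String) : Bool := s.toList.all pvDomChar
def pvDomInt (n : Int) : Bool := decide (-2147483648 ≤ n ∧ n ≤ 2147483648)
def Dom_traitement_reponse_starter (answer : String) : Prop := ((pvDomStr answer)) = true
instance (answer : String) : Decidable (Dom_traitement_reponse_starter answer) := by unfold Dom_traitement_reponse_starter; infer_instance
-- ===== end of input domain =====

-- B reverses A's phase order (find first ASCII letter in the original, then lowercase only the suffix);
-- return-value equivalence on inputs containing an ASCII letter (elsewhere both Pythons raise IndexError).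

-- ===== PORT A =====
-- helper `min` of A: lowercase pass building txt by appending char by char
def pyMinA (s : List Char) : List Char :=
  s.foldl (fun txt c =>
    txt ++ [if 65 ≤ c.toNat ∧ c.toNat ≤ 90 then Char.ofNat (c.toNat + 32) else c]) []

-- A's while loop: advance i while answer[i] is not in alphabet = ['a'..'z']; returns the suffix from i.
-- On a string with no lowercase letter Python raises IndexError (excluded by Pre_); here [] stands in.
def skipWhileA (l : List Char) : List Char :=
  match l with
  | [] => []
  | c :: rest => if 97 ≤ c.toNat ∧ c.toNat ≤ 122 then c :: rest else skipWhileA rest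

-- A's for loop: txt += answer[j] for j in range(i, len(answer)) — copies the suffix char by char
def copyA (l : List Char) : List Char :=
  l.foldl (fun txt c => txt ++ [c]) []

def traitement_reponse_starter (answer : String) : String :=
  String.mk (copyA (skipWhileA (pyMinA answer.toList)))

-- ===== PORT B =====
-- B's while loop on the ORIGINAL string: skip until an ASCII letter (upper or lower)
def skipWhileB (l : List Char) : List Char :=
  match l with
  | [] => []
  | c :: rest =>
    if (97 ≤ c.toNat ∧ c.toNat ≤ 122) ∨ (65 ≤ c.toNat ∧ c.toNat ≤ 90) then c :: rest
    else skipWhileB rest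

def traitement_reponse_starter_alt (answer : String) : String :=
  String.mk ((skipWhileB answer.toList).map
    (fun c => if 65 ≤ c.toNat ∧ c.toNat ≤ 90 then Char.ofNat (c.toNat + 32) else c))

-- ===== PRECONDITION & SPEC =====
-- Pre_ excludes exactly the strings with no ASCII letter, on which both Pythons raise IndexError.
def Pre_traitement_reponse_starter (answer : String) : Prop :=
  (answer.toList.any (fun c =>
    (97 ≤ c.toNat && c.toNat ≤ 122) || (65 ≤ c.toNat && c.toNat ≤ 90))) = true
instance (answer : String) : Decidable (Pre_traitement_reponse_starter answer) := by
  unfold Pre_traitement_reponse_starter; infer_instance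
def pvWitness_traitement_reponse_starter : String := "a"

def Spec_traitement_reponse_starter (answer : String) (out : String) : Prop :=
  out = traitement_reponse_starter_alt answer
instance (answer : String) (out : String) : Decidable (Spec_traitement_reponse_starter answer out) := by
  unfold Spec_traitement_reponse_starter; infer_instance

-- ===== CLAIM (what is proved, stated in full; the proofs are below) =====
def Claim_equal_traitement_reponse_starter : Prop := ∀ (answer : String), Dom_traitement_reponse_starter answer → Pre_traitement_reponse_starter answer → Spec_traitement_reponse_starter answer (traitement_reponse_starter answer)

-- ===== LEMMAS AND PROOFS =====

def lowChar (c : Char) : Char :=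
  if 65 ≤ c.toNat ∧ c.toNat ≤ 90 then Char.ofNat (c.toNat + 32) else c

theorem toNat_lowChar (c : Char) (h : 65 ≤ c.toNat ∧ c.toNat ≤ 90) :
    (lowChar c).toNat = c.toNat + 32 := by
  unfold lowChar
  rw [if_pos h]
  have hv : (c.toNat + 32).isValidChar := Or.inl (by omega)
  simp only [Char.ofNat, dif_pos hv, Char.ofNatAux]
  rfl

theorem lowChar_of_not (c : Char) (h : ¬ (65 ≤ c.toNat ∧ c.toNat ≤ 90)) :
    lowChar c = c := by
  unfold lowChar; rw [if_neg h]

theorem foldl_append_map (f : Char → Char) (l : List Char) (acc : List Char) :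
    l.foldl (fun txt c => txt ++ [f c]) acc = acc ++ l.map f := by
  induction l generalizing acc with
  | nil => simp
  | cons c rest ih => simp [List.foldl, ih]

theorem pyMinA_eq_map (s : List Char) : pyMinA s = s.map lowChar := by
  unfold pyMinA
  have := foldl_append_map lowChar s []
  simpa [lowChar] using this

theorem copyA_id (l : List Char) : copyA l = l := by
  unfold copyA
  have := foldl_append_map id l []
  simpa using this

theorem skipWhileA_map_low (l : List Char) :
    skipWhileA (l.map lowChar) = (skipWhileB l).map lowChar := by
  induction l with
  | nil => simp [skipWhileA, skipWhileB]
  | cons c rest ih =>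
    by_cases hu : 65 ≤ c.toNat ∧ c.toNat ≤ 90
    · have ht := toNat_lowChar c hu
      simp only [List.map, skipWhileA, skipWhileB]
      rw [if_pos (by omega), if_pos (by omega)]
      simp
    · have he : lowChar c = c := lowChar_of_not c hu
      simp only [List.map, skipWhileA, skipWhileB, he]
      by_cases hl : 97 ≤ c.toNat ∧ c.toNat ≤ 122
      · rw [if_pos hl, if_pos (Or.inl hl)]; simp [he]
      · rw [if_neg hl, if_neg (by tauto), ih]

-- ===== VERDICT (by name: the statement is the Claim_ definition above) =====
theorem traitement_reponse_starter_spec : Claim_equal_traitement_reponse_starter := by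
  intro answer _ _
  unfold Spec_traitement_reponse_starter traitement_reponse_starter traitement_reponse_starter_alt
  rw [pyMinA_eq_map, copyA_id, skipWhileA_map_low]
  rfl
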